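-- pv_equiv track=rewrite | github.com/yasir2000/feriq | feriq/components/reasoner.py | _build_causal_chains
-- ===== SOURCE A (Python) =====
-- from typing import Dict, List, Optional, Any, Set, Callable, Tuple, Union
-- from collections import defaultdict, deque
--
-- def _build_causal_chains(events: List[str], relationships: List[Dict[str, str]]) -> Dict[str, List[str]]:
--     """Build causal chains from events and relationships."""
--     chains = defaultdict(list)
--
--     for rel in relationships:
--         cause = rel.get("cause")
--         effect = rel.get("effect")
--         if cause and effect:
--             chains[effect].append(cause)
--
--     return dict(chains)
-- ===== SOURCE B (Python) =====
-- def _build_causal_chains(events, relationships):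
--     """Build causal chains: filter valid (effect, cause) pairs once, then
--     build the result from the ordered distinct effects with per-effect scans."""
--     valid = [(r.get("effect", ""), r.get("cause", "")) for r in relationships
--              if r.get("cause", "") and r.get("effect", "")]
--     effects = list(dict.fromkeys(e for e, _ in valid))
--     return {e: [c for e2, c in valid if e2 == e] for e in effects}
-- ===== Notes on version B (the rewrite author's own statement) =====
-- stated objective: alternative
-- what changed: Replaces the defaultdict accumulation loop with a filter-once pass producing (effect, cause) pairs, a first-appearance dedup of effects, and a per-effect comprehension building each cause list.
import Mathlib
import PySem

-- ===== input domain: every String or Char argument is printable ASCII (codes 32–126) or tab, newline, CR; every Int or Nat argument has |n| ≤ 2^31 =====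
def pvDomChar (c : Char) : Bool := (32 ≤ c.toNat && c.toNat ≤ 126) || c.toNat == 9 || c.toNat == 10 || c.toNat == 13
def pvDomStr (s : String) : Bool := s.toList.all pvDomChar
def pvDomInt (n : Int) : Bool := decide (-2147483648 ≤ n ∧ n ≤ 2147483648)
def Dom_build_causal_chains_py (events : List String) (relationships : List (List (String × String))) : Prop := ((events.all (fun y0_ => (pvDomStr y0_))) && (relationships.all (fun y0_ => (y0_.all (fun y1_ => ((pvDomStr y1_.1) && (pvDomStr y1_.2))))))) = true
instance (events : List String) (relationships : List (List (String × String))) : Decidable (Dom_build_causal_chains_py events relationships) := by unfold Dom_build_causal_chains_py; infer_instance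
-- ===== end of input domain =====

-- B differs from A only in decomposition (filter, dedup effects, per-effect scan); return values agree exactly.

-- ===== PORT A =====
-- for rel in relationships: cause = rel.get("cause"); effect = rel.get("effect");
-- if cause and effect: chains[effect].append(cause)   (defaultdict(list)); return dict(chains)
def build_causal_chains_py (events : List String) (relationships : List (List (String × String))) : List (String × List String) :=
  (relationships.foldl (fun chains rel =>
      match (PySem.Dict.mk rel).get? "cause", (PySem.Dict.mk rel).get? "effect" with
      | some cause, some effect =>
          if cause ≠ "" ∧ effect ≠ "" then
            chains.modify effect [] (fun x => x ++ [cause])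
          else chains
      | _, _ => chains) PySem.Dict.empty).items

-- ===== PORT B =====
-- valid = [(r.get("effect", ""), r.get("cause", "")) for r in relationships if r.get("cause", "") and r.get("effect", "")]
-- effects = list(dict.fromkeys(e for e, _ in valid)); return {e: [c for e2, c in valid if e2 == e] for e in effects}
-- B-side helper: the pair filter of Source B's first comprehension
def pvValidPair (rel : List (String × String)) : Option (String × String) :=
  let cause := ((PySem.Dict.mk rel).get? "cause").getD ""
  let effect := ((PySem.Dict.mk rel).get? "effect").getD ""
  if cause ≠ "" ∧ effect ≠ "" then some (effect, cause) else none

def build_causal_chains_py_alt (events : List String) (relationships : List (List (String × String))) : List (String × List String) :=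
  let valid : List (String × String) := relationships.filterMap pvValidPair
  let effects : List String := PySem.Set.ofList (valid.map (fun p => p.1))
  effects.map (fun e => (e, (valid.filter (fun p => p.1 == e)).map (fun p => p.2)))

-- ===== PRECONDITION & SPEC =====
def Spec_build_causal_chains_py (events : List String) (relationships : List (List (String × String))) (out : List (String × List String)) : Prop := out = build_causal_chains_py_alt events relationships
instance (events : List String) (relationships : List (List (String × String))) (out : List (String × List String)) : Decidable (Spec_build_causal_chains_py events relationships out) := by unfold Spec_build_causal_chains_py; infer_instance

-- ===== CLAIM (what is proved, stated in full; the proofs are below) =====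
def Claim_equal_build_causal_chains_py : Prop := ∀ (events : List String) (relationships : List (List (String × String))), Dom_build_causal_chains_py events relationships → Spec_build_causal_chains_py events relationships (build_causal_chains_py events relationships)

-- ===== LEMMAS AND PROOFS =====

-- A's branch on one relationship, expressed through B's pair filter.
theorem step_eq_valid (rel : List (String × String)) (chains : PySem.Dict String (List String)) :
    (match (PySem.Dict.mk rel).get? "cause", (PySem.Dict.mk rel).get? "effect" with
      | some cause, some effect =>
          if cause ≠ "" ∧ effect ≠ "" then
            chains.modify effect [] (fun x => x ++ [cause])
          else chains
      | _, _ => chains)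
    = (pvValidPair rel).elim chains (fun p => chains.modify p.1 [] (fun x => x ++ [p.2])) := by
  unfold pvValidPair
  cases hc : (PySem.Dict.mk rel).get? "cause" <;>
    cases he : (PySem.Dict.mk rel).get? "effect" <;>
    simp only [Option.getD_some, Option.getD_none] <;>
    (split <;> simp_all)

-- A's loop over relationships equals the grouping loop over B's filtered pairs.
theorem foldl_eq_foldl_valid (rels : List (List (String × String)))
    (d : PySem.Dict String (List String)) :
    rels.foldl (fun chains rel =>
      match (PySem.Dict.mk rel).get? "cause", (PySem.Dict.mk rel).get? "effect" with
      | some cause, some effect =>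
          if cause ≠ "" ∧ effect ≠ "" then
            chains.modify effect [] (fun x => x ++ [cause])
          else chains
      | _, _ => chains) d
    = (rels.filterMap pvValidPair).foldl
        (fun d p => d.modify p.1 [] (fun x => x ++ [p.2])) d := by
  induction rels generalizing d with
  | nil => rfl
  | cons rel rest ih =>
      simp only [List.foldl_cons, List.filterMap_cons, step_eq_valid]
      simp only [step_eq_valid] at ih
      cases hv : pvValidPair rel <;>
        simp only [Option.elim, List.foldl_cons] <;> apply ih

-- ===== VERDICT (by name: the statement is the Claim_ definition above) =====
theorem build_causal_chains_py_spec : Claim_equal_build_causal_chains_py := by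
  intro events relationships _
  show build_causal_chains_py events relationships = build_causal_chains_py_alt events relationships
  unfold build_causal_chains_py build_causal_chains_py_alt
  rw [foldl_eq_foldl_valid]
  set valid := relationships.filterMap pvValidPair with hvalid
  have hkeys : (valid.foldl (fun d p => d.modify p.1 [] (fun x => x ++ [p.2])) PySem.Dict.empty).keys
      = PySem.Set.ofList (valid.map (fun p => p.1)) := by
    rw [PySem.Dict.keys_foldl_modify_key valid (fun p => p.1) [] (fun _ p => fun x => x ++ [p.2])]
    simp [PySem.Set.update_nil_left]
  have hnd : (valid.foldl (fun d p => d.modify p.1 [] (fun x => x ++ [p.2])) PySem.Dict.empty).keys.Nodup := by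
    apply PySem.Dict.nodup_keys_foldl_modify_key valid (fun p => p.1) [] (fun _ p => fun x => x ++ [p.2])
    simp
  rw [PySem.Dict.items_eq_map_keys _ hnd [], hkeys]
  apply List.map_congr_left
  intro e _
  rw [PySem.Dict.getD_foldl_modify_append]
  simp
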